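-- pv_equiv track=rewrite | github.com/weronikaglazer/pp1 | 13-Test3/p1.py | f
-- ===== SOURCE A (Python) =====
-- def f(n):
--     sticks = ""
--     if (n < 1):
--         return ""
--     else:
--         for i in range(1,n+1):
--             sticks += "/"
--             try:
--                 if (i % 5 == 0):
--                     sticks += "-"
--             except:
--                 pass
--
--         if (sticks[-1] == "-"):
--             sticks = sticks[:-1]
--
--         return sticks
-- ===== SOURCE B (Python) =====
-- def f(n):
--     if n < 1:
--         return ""
--     q, r = divmod(n, 5)
--     chunks = ["/" * 5] * q
--     if r:
--         chunks.append("/" * r)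
--     return "-".join(chunks)
-- ===== Notes on version B (the rewrite author's own statement) =====
-- stated objective: faster
-- what changed: Replaces the per-character loop with a modulo branch and trailing-dash trim by arithmetic chunking: divmod(n,5) gives the number of full five-slash groups and a possible partial group, built by string repetition and joined with '-' in one pass, with no trim step.
import Mathlib
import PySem

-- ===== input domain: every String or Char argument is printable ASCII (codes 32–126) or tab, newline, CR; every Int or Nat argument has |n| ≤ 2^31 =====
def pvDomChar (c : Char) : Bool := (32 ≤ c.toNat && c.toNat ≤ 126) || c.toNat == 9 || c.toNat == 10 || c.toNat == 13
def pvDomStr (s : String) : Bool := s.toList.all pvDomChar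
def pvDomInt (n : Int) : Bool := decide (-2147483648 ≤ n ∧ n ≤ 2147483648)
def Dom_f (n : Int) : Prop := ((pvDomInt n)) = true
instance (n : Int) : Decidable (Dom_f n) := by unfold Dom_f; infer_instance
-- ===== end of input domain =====

-- B replaces A's per-character loop (modulo branch + trailing-dash trim) by divmod
-- chunking and a single '-'-join; objective: a faster, simpler construction (bulk repetition/join instead of per-character appends).


-- ===== PORT A =====
-- sticks is kept as a List Char; String.ofList at the end. sticks[-1] is exact here:
-- the loop runs at least once (n ≥ 1), so the string is nonempty and Python never raises.
def f (n : Int) : String :=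
  if n < 1 then "" else
    let sticks : List Char :=
      (PySem.List.pyRange 1 (n + 1) 1).foldl
        (fun s i =>
          let s := s ++ ['/']
          if PySem.Int.mod i 5 == 0 then s ++ ['-'] else s) []
    let sticks :=
      if PySem.List.pyGet? sticks (-1) == some '-' then
        PySem.List.slice sticks none (some (-1))
      else sticks
    String.ofList sticks

-- ===== PORT B =====
def f_alt (n : Int) : String :=
  if n < 1 then "" else
    let q := PySem.Int.floordiv n 5
    let r := PySem.Int.mod n 5
    let chunks : List (List Char) :=
      List.replicate q.toNat (List.replicate 5 '/') ++
        (if r ≠ 0 then [List.replicate r.toNat '/'] else [])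
    String.ofList (PySem.Chars.join ['-'] chunks)

-- ===== PRECONDITION & SPEC =====
def Spec_f (n : Int) (out : String) : Prop := out = f_alt n
instance (n : Int) (out : String) : Decidable (Spec_f n out) := by unfold Spec_f; infer_instance

-- ===== CLAIM (what is proved, stated in full; the proofs are below) =====
def Claim_equal_f : Prop := ∀ (n : Int), Dom_f n → Spec_f n (f n)

-- ===== LEMMAS AND PROOFS =====

-- canonical answer for n = m sticks: g m is the final trimmed string as a char list
def g : Nat → List Char
  | 0 => []
  | m + 1 => g m ++ (if m % 5 = 0 ∧ m ≠ 0 then ['-', '/'] else ['/'])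

-- A's loop body
def stepA (s : List Char) (i : Int) : List Char :=
  let s := s ++ ['/']
  if PySem.Int.mod i 5 == 0 then s ++ ['-'] else s

def loopA (m : Nat) : List Char :=
  (PySem.List.pyRange 1 ((m : Int) + 1) 1).foldl stepA []

lemma loopA_eq (m : Nat) :
    loopA m = g m ++ (if m % 5 = 0 ∧ m ≠ 0 then ['-'] else []) := by
  induction m with
  | zero => simp [loopA, PySem.List.pyRange_one_eq_nil, g]
  | succ m ih =>
    have hstep : loopA (m + 1) = stepA (loopA m) ((m : Int) + 1) := by
      unfold loopA
      rw [show (((m + 1 : Nat) : Int) + 1) = ((m : Int) + 1) + 1 by push_cast; ring,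
        PySem.List.pyRange_one_succ_right (by omega), List.foldl_append]
      rfl
    rw [hstep, ih]
    have hmod : PySem.Int.mod ((m : Int) + 1) 5 = (((m + 1) % 5 : Nat) : Int) := by
      rw [PySem.Int.mod_eq_emod_of_pos (by omega)]
      omega
    unfold stepA
    rw [hmod]
    have h5 : m % 5 = 0 ∨ m % 5 = 1 ∨ m % 5 = 2 ∨ m % 5 = 3 ∨ m % 5 = 4 := by omega
    by_cases hm0 : m = 0
    · subst hm0; simp [g]
    · rcases h5 with h | h | h | h | h <;>
        simp [g, h, hm0, show (m + 1) % 5 = (m % 5 + 1) % 5 by omega]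

lemma getLast?_g (m : Nat) (hm : 1 ≤ m) : (g m).getLast? = some '/' := by
  cases m with
  | zero => omega
  | succ m => unfold g; split <;> simp

-- join with a last chunk appended
lemma join_append_singleton (sep : List Char) (xs : List (List Char)) (c : List Char) :
    PySem.Chars.join sep (xs ++ [c]) =
      (match xs with
       | [] => c
       | _ :: _ => PySem.Chars.join sep xs ++ sep ++ c) := by
  induction xs with
  | nil => simp [PySem.Chars.join_singleton]
  | cons a xs ih =>
    cases xs with
    | nil => simp [PySem.Chars.join_cons_cons, PySem.Chars.join_singleton]
    | cons b ys =>
      rw [show a :: b :: ys ++ [c] = a :: b :: (ys ++ [c]) from rfl,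
        PySem.Chars.join_cons_cons,
        show b :: (ys ++ [c]) = b :: ys ++ [c] from rfl, ih, PySem.Chars.join_cons_cons]
      simp

-- B's chunk construction, over Nat
def chunksN (m : Nat) : List (List Char) :=
  List.replicate (m / 5) (List.replicate 5 '/') ++
    (if m % 5 ≠ 0 then [List.replicate (m % 5) '/'] else [])

lemma join_chunksN (m : Nat) : PySem.Chars.join ['-'] (chunksN m) = g m := by
  induction m with
  | zero => simp [chunksN, PySem.Chars.join_nil, g]
  | succ m ih =>
    by_cases h0 : m % 5 = 0
    · -- a new partial chunk ['/'] starts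
      have hq : (m + 1) / 5 = m / 5 := by omega
      have hr : (m + 1) % 5 = 1 := by omega
      have hc : chunksN (m + 1) =
          List.replicate (m / 5) (List.replicate 5 '/') ++ [['/']] := by
        unfold chunksN; rw [hq, hr]; simp
      have hc' : chunksN m = List.replicate (m / 5) (List.replicate 5 '/') := by
        unfold chunksN; simp [h0]
      rw [hc, join_append_singleton]
      rw [hc'] at ih
      rcases hq0 : m / 5 with _ | k
      · have hm0 : m = 0 := by omega
        subst hm0
        simp [g]
      · have hm0 : m ≠ 0 := by omega
        rw [hq0] at ih
        simp only [List.replicate_succ]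
        simp only [List.replicate_succ] at ih
        rw [ih]
        simp [g, h0, hm0]
    · -- the last (partial) chunk grows by one '/'
      have hc : chunksN (m + 1) =
          List.replicate (m / 5) (List.replicate 5 '/') ++ [List.replicate (m % 5 + 1) '/'] := by
        unfold chunksN
        by_cases h4 : m % 5 = 4
        · have hq : (m + 1) / 5 = m / 5 + 1 := by omega
          have hr : (m + 1) % 5 = 0 := by omega
          rw [hq, hr, h4]
          simp [List.replicate_succ']
        · have hq : (m + 1) / 5 = m / 5 := by omega
          have hr : (m + 1) % 5 = m % 5 + 1 := by omega
          rw [hq, hr]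
          simp
      have hc' : chunksN m =
          List.replicate (m / 5) (List.replicate 5 '/') ++ [List.replicate (m % 5) '/'] := by
        unfold chunksN; simp [h0]
      rw [hc'] at ih
      rw [hc, join_append_singleton]
      rw [join_append_singleton] at ih
      have hg : g (m + 1) = g m ++ ['/'] := by
        conv_lhs => rw [g]
        simp [h0]
      rw [hg, ← ih]
      rcases hq0 : m / 5 with _ | k
      · simp [List.replicate_succ']
      · simp [List.replicate_succ]
        rw [← List.replicate_succ, List.replicate_succ']

-- for n ≥ 1, f returns the canonical string
lemma f_of_pos (n : Int) (hn : 1 ≤ n) : f n = String.ofList (g n.toNat) := by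
  have hm : n = (n.toNat : Int) := by omega
  have key := loopA_eq n.toNat
  have hs : stepA = fun (s : List Char) (i : Int) =>
      if (PySem.Int.mod i 5 == 0) = true then s ++ ['/'] ++ ['-'] else s ++ ['/'] := by
    funext s i
    simp [stepA]
  simp only [loopA, hs] at key
  simp only [f, if_neg (show ¬ n < 1 by omega)]
  rw [hm]
  simp only [Int.toNat_natCast]
  rw [key]
  by_cases hd : n.toNat % 5 = 0 ∧ n.toNat ≠ 0
  · rw [if_pos hd]
    rw [PySem.List.pyGet?_neg_one_append_singleton]
    simp [PySem.List.slice_to_neg_one]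
  · rw [if_neg hd, List.append_nil, PySem.List.pyGet?_neg_one,
      getLast?_g n.toNat (by omega)]
    simp
lemma f_alt_of_pos (n : Int) (hn : 1 ≤ n) : f_alt n = String.ofList (g n.toNat) := by
  have hq : PySem.Int.floordiv n 5 = ((n.toNat / 5 : Nat) : Int) := by
    rw [PySem.Int.floordiv_eq_ediv_of_pos (by omega)]
    omega
  have hr : PySem.Int.mod n 5 = ((n.toNat % 5 : Nat) : Int) := by
    rw [PySem.Int.mod_eq_emod_of_pos (by omega)]
    omega
  simp only [f_alt, if_neg (show ¬ n < 1 by omega), hq, hr]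
  have hch : List.replicate ((n.toNat / 5 : Nat) : Int).toNat (List.replicate 5 '/') ++
      (if ((n.toNat % 5 : Nat) : Int) ≠ 0 then [List.replicate ((n.toNat % 5 : Nat) : Int).toNat '/'] else []) =
      chunksN n.toNat := by
    unfold chunksN
    rw [Int.toNat_natCast, Int.toNat_natCast]
    by_cases h : n.toNat % 5 = 0
    · rw [if_neg (by simp [h]), if_neg (by simp [h])]
    · rw [if_pos (show (((n.toNat % 5 : Nat) : Int)) ≠ 0 by exact_mod_cast h), if_pos h]
  rw [hch, join_chunksN]
-- ===== VERDICT (by name: the statement is the Claim_ definition above) =====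
theorem f_spec : Claim_equal_f := by
  intro n _
  unfold Spec_f
  by_cases hn : n < 1
  · simp [f, f_alt, hn]
  · rw [f_of_pos n (by omega), f_alt_of_pos n (by omega)]
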